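-- pv_equiv track=rewrite | github.com/Aasthaengg/IBMdataset | Python_codes/p02405/s931427279.py | gusuu
-- ===== SOURCE A (Python) =====
-- def gusuu(a):
--     b = []
--     for i in range(a):
--         if i%2==0:
--             b.append(".")
--         else:
--             b.append("#")
--     return(b)
-- ===== SOURCE B (Python) =====
-- def gusuu(a):
--     return (['.', '#'] * ((a + 1) // 2))[:a]
-- ===== Notes on version B (the rewrite author's own statement) =====
-- stated objective: simpler
-- what changed: Replaces the per-index loop with a parity branch by a repeat-and-truncate construction: replicate the base two-element pattern and slice the result to length a.
import Mathlib
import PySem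

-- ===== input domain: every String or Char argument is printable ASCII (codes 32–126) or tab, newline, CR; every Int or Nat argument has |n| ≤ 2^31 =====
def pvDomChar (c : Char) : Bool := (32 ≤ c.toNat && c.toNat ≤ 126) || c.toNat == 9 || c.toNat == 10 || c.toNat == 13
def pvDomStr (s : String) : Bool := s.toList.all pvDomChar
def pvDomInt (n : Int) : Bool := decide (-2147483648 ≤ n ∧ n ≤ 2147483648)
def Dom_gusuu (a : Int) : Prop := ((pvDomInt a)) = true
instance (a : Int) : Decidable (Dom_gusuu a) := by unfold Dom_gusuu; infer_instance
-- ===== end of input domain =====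

-- B replaces A's index loop with a parity test by a repeat-and-truncate construction
-- (replicate ['.', '#'] and slice to length a); objective: simpler.

-- ===== PORT A =====
-- for i in range(a): append "." if i%2==0 else "#"
def gusuu (a : Int) : List String :=
  (PySem.List.pyRange 0 a 1).foldl
    (fun b i => if PySem.Int.mod i 2 == 0 then b ++ ["."] else b ++ ["#"]) []

-- ===== PORT B =====
-- (['.', '#'] * ((a + 1) // 2))[:a]
-- Python list*n with n ≤ 0 is []: Int.toNat clamps negatives to 0, which is exact here.
def gusuu_alt (a : Int) : List String :=
  PySem.List.slice
    ((List.replicate (PySem.Int.floordiv (a + 1) 2).toNat [".", "#"]).flatten)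
    none (some a)

-- ===== PRECONDITION & SPEC =====
def Spec_gusuu (a : Int) (out : List String) : Prop := out = gusuu_alt a
instance (a : Int) (out : List String) : Decidable (Spec_gusuu a out) := by unfold Spec_gusuu; infer_instance

-- ===== CLAIM (what is proved, stated in full; the proofs are below) =====
def Claim_equal_gusuu : Prop := ∀ (a : Int), Dom_gusuu a → Spec_gusuu a (gusuu a)

-- ===== LEMMAS AND PROOFS =====

-- the replicated base pattern
def pvPat (m : Nat) : List String := (List.replicate m [".", "#"]).flatten

lemma pvPat_get (m : Nat) : ∀ n : Nat, n < 2 * m →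
    (pvPat m)[n]? = some (if n % 2 = 0 then "." else "#") := by
  induction m with
  | zero => intro n h; omega
  | succ m ih =>
    intro n h
    have hp : pvPat (m + 1) = "." :: "#" :: pvPat m := by
      simp [pvPat, List.replicate_succ]
    rw [hp]
    match n with
    | 0 => simp
    | 1 => simp
    | n + 2 =>
      have := ih n (by omega)
      simpa [List.getElem?_cons, Nat.add_mod_right] using this

lemma pvLoop (K : Nat) : ∀ n : Nat, n ≤ 2 * K →
    (PySem.List.pyRange 0 (n : Int) 1).foldl
      (fun b i => if PySem.Int.mod i 2 == 0 then b ++ ["."] else b ++ ["#"]) []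
      = (pvPat K).take n := by
  intro n
  induction n with
  | zero => intro; simp
  | succ n ih =>
    intro h
    have hr : PySem.List.pyRange 0 ((n : Int) + 1) 1
        = PySem.List.pyRange 0 (n : Int) 1 ++ [(n : Int)] :=
      PySem.List.pyRange_one_succ_right (by exact_mod_cast Nat.zero_le n)
    rw [show ((n + 1 : Nat) : Int) = ((n : Int) + 1) from by push_cast; ring, hr,
      List.foldl_append, ih (by omega)]
    have hm : PySem.Int.mod (n : Int) 2 = ((n % 2 : Nat) : Int) := by
      exact_mod_cast PySem.Int.mod_natCast n 2
    have ht : (pvPat K).take (n + 1) = (pvPat K).take n ++ [if n % 2 = 0 then "." else "#"] := by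
      rw [List.take_add_one, pvPat_get K n (by omega)]
      simp
    rw [ht]
    simp only [List.foldl_cons, List.foldl_nil, hm]
    rcases Nat.even_or_odd n with he | ho
    · have : n % 2 = 0 := Nat.even_iff.mp he
      simp [this]
    · have : n % 2 = 1 := Nat.odd_iff.mp ho
      simp [this]

-- ===== VERDICT (by name: the statement is the Claim_ definition above) =====
theorem gusuu_spec : Claim_equal_gusuu := by
  intro a _
  unfold Spec_gusuu gusuu gusuu_alt
  by_cases hle : a ≤ 0
  · -- a ≤ 0: loop is empty and the replication count is ≤ 0
    rw [PySem.List.pyRange_one_eq_nil hle]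
    have hd : PySem.Int.floordiv (a + 1) 2 ≤ 0 := by
      rw [PySem.Int.floordiv_eq_ediv_of_pos (by omega)]; omega
    have h0 : (PySem.Int.floordiv (a + 1) 2).toNat = 0 := Int.toNat_of_nonpos hd
    rw [h0]
    simp [PySem.List.slice]
  · -- a > 0: a = ↑n, count = (n+1)/2, and 2 * ((n+1)/2) ≥ n
    have hpos : 0 < a := by omega
    obtain ⟨n, rfl⟩ : ∃ n : Nat, a = (n : Int) := ⟨a.toNat, (Int.toNat_of_nonneg hpos.le).symm⟩
    have hd : PySem.Int.floordiv ((n : Int) + 1) 2 = (((n + 1) / 2 : Nat) : Int) := by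
      exact_mod_cast PySem.Int.floordiv_natCast (n + 1) 2
    rw [hd, PySem.List.slice_to_natCast]
    simpa [pvPat] using pvLoop ((n + 1) / 2) n (by omega)
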